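-- pv_equiv track=rewrite | github.com/Gaurav-Codetek/poc_lineage_backend | app/services/dq_service.py | _build_suggestions_static
-- ===== SOURCE A (Python) =====
-- from typing import Any, Dict, List, Optional, Tuple
--
-- RULE_ORDER = [
--     "not_null",
--     "no_blank_strings",
--     "length_validation",
--     "unique_values",
--     "numeric_range_validation",
--     "zero_value_check",
--     "no_future_dates",
--     "freshness_validation",
-- ]
--
-- def _static_suggest(dtype: str) -> List[str]:
--     normalized_dtype = (dtype or "").upper()
--     rules = ["not_null", "unique_values"]
--     if normalized_dtype == "STRING":
--         rules += ["no_blank_strings", "length_validation"]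
--     if normalized_dtype in {"LONG", "DOUBLE", "INTEGER"}:
--         rules += ["numeric_range_validation", "zero_value_check"]
--     if normalized_dtype in {"TIMESTAMP", "DATE"}:
--         rules += ["no_future_dates", "freshness_validation"]
--     return rules
--
-- def _build_suggestions_static(columns: List[Dict[str, Any]]) -> Tuple[Dict[str, List[str]], Dict[str, str]]:
--     suggested_by_rule = {rule: [] for rule in RULE_ORDER}
--     dtype_by_col = {}
--
--     for column in columns:
--         name = column["column_name"]
--         dtype = column.get("data_type", "")
--         dtype_by_col[name] = dtype
--         for rule in _static_suggest(dtype):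
--             suggested_by_rule.setdefault(rule, []).append(name)
--
--     suggested_by_rule = {rule: columns for rule, columns in suggested_by_rule.items() if columns}
--     return suggested_by_rule, dtype_by_col
-- ===== SOURCE B (Python) =====
-- from typing import Any, Dict, List, Optional, Tuple
--
-- RULE_ORDER = [
--     "not_null",
--     "no_blank_strings",
--     "length_validation",
--     "unique_values",
--     "numeric_range_validation",
--     "zero_value_check",
--     "no_future_dates",
--     "freshness_validation",
-- ]
--
-- def _static_suggest(dtype: str) -> List[str]:
--     normalized_dtype = (dtype or "").upper()
--     rules = ["not_null", "unique_values"]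
--     if normalized_dtype == "STRING":
--         rules += ["no_blank_strings", "length_validation"]
--     if normalized_dtype in {"LONG", "DOUBLE", "INTEGER"}:
--         rules += ["numeric_range_validation", "zero_value_check"]
--     if normalized_dtype in {"TIMESTAMP", "DATE"}:
--         rules += ["no_future_dates", "freshness_validation"]
--     return rules
--
-- def _build_suggestions_static(columns: List[Dict[str, Any]]) -> Tuple[Dict[str, List[str]], Dict[str, str]]:
--     # One pass for dtypes (last occurrence of a name wins, first position kept),
--     # then gather columns per rule, keeping only rules that matched something.
--     dtype_by_col = {c["column_name"]: c.get("data_type", "") for c in columns}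
--     suggested_by_rule = {}
--     for rule in RULE_ORDER:
--         names = [c["column_name"] for c in columns
--                  if rule in _static_suggest(c.get("data_type", ""))]
--         if names:
--             suggested_by_rule[rule] = names
--     return suggested_by_rule, dtype_by_col
-- ===== Notes on version B (the rewrite author's own statement) =====
-- stated objective: alternative
-- what changed: Replaces the per-column scatter into a pre-seeded rule dict (setdefault/append then a non-empty filter) by building dtype_by_col with a dict comprehension and then gathering, for each rule in RULE_ORDER, the names of matching columns in one comprehension, keeping the rule only if it matched.
-- outside the precondition, e.g. on _build_suggestions_static([{'data_type': 'STRING'}]): A raises KeyError, B raises KeyError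
import Mathlib
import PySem

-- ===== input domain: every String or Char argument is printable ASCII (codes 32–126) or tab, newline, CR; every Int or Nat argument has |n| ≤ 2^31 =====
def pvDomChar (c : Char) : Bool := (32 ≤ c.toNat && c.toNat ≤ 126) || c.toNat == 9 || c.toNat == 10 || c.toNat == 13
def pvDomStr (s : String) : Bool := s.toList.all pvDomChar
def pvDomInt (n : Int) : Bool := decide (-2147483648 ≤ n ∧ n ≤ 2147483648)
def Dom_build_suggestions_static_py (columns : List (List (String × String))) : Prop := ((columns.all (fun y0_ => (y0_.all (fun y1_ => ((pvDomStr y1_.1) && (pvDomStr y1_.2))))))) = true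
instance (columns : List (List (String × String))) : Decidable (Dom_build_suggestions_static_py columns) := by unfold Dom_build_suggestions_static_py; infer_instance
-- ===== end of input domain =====

-- B groups column names by iterating RULE_ORDER on the outside (gather-by-rule)
-- instead of A's per-column scatter into a pre-seeded dict; objective: alternative decomposition.

-- ===== PORT A =====

def ruleOrder : List String :=
  ["not_null", "no_blank_strings", "length_validation", "unique_values",
   "numeric_range_validation", "zero_value_check", "no_future_dates", "freshness_validation"]

def staticSuggest (dtype : String) : List String :=
  let normalized := PySem.Str.upper (if dtype = "" then "" else dtype)  -- (dtype or "")
  let rules := ["not_null", "unique_values"]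
  let rules := if normalized = "STRING" then rules ++ ["no_blank_strings", "length_validation"] else rules
  let rules := if normalized ∈ ["LONG", "DOUBLE", "INTEGER"] then rules ++ ["numeric_range_validation", "zero_value_check"] else rules
  let rules := if normalized ∈ ["TIMESTAMP", "DATE"] then rules ++ ["no_future_dates", "freshness_validation"] else rules
  rules

-- dict assignment d[k] = v on an association list: overwrite in place, new keys appended (exact)
def dictSet (d : List (String × String)) (k v : String) : List (String × String) :=
  match d with
  | [] => [(k, v)]
  | (k', v') :: rest => if k' = k then (k, v) :: rest else (k', v') :: dictSet rest k v

-- suggested_by_rule.setdefault(rule, []).append(name) on an association list (exact)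
def appendAt (d : List (String × List String)) (k name : String) : List (String × List String) :=
  match d with
  | [] => [(k, [name])]
  | (k', v) :: rest => if k' = k then (k', v ++ [name]) :: rest else (k', v) :: appendAt rest k name

def build_suggestions_static_py (columns : List (List (String × String))) : (List (String × List String)) × (List (String × String)) :=
  let init : List (String × List String) := ruleOrder.map (fun r => (r, []))
  let st := columns.foldl (fun (st : List (String × List String) × List (String × String)) column =>
    let name := (PySem.Dict.get? ⟨column⟩ "column_name").getD ""  -- KeyError when absent: outside Pre_
    let dtype := (PySem.Dict.get? ⟨column⟩ "data_type").getD ""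
    let dtypes := dictSet st.2 name dtype
    let sugg := (staticSuggest dtype).foldl (fun d rule => appendAt d rule name) st.1
    (sugg, dtypes)) (init, [])
  (st.1.filter (fun p => !p.2.isEmpty), st.2)

-- ===== PORT B =====

def build_suggestions_static_py_alt (columns : List (List (String × String))) : (List (String × List String)) × (List (String × String)) :=
  let dtype_by_col := columns.foldl (fun d column =>
    dictSet d ((PySem.Dict.get? ⟨column⟩ "column_name").getD "") ((PySem.Dict.get? ⟨column⟩ "data_type").getD "")) []
  let suggested_by_rule := ruleOrder.filterMap (fun rule =>
    let names := columns.filterMap (fun column =>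
      if rule ∈ staticSuggest ((PySem.Dict.get? ⟨column⟩ "data_type").getD "")
      then some ((PySem.Dict.get? ⟨column⟩ "column_name").getD "") else none)
    if names.isEmpty then none else some (rule, names))
  (suggested_by_rule, dtype_by_col)

-- ===== PRECONDITION & SPEC =====
-- Pre_ excludes columns missing the "column_name" key, on which A raises KeyError.
def Pre_build_suggestions_static_py (columns : List (List (String × String))) : Prop :=
  (columns.all (fun c => c.any (fun p => p.1 == "column_name"))) = true
instance (columns : List (List (String × String))) : Decidable (Pre_build_suggestions_static_py columns) := by unfold Pre_build_suggestions_static_py; infer_instance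

def pvWitness_build_suggestions_static_py : (List (List (String × String))) :=
  [[("column_name", "id"), ("data_type", "long")], [("column_name", "name"), ("data_type", "string")]]

def Spec_build_suggestions_static_py (columns : List (List (String × String))) (out : (List (String × List String)) × (List (String × String))) : Prop := out = build_suggestions_static_py_alt columns
instance (columns : List (List (String × String))) (out : (List (String × List String)) × (List (String × String))) : Decidable (Spec_build_suggestions_static_py columns out) := by unfold Spec_build_suggestions_static_py; infer_instance

-- ===== CLAIM (what is proved, stated in full; the proofs are below) =====
def Claim_equal_build_suggestions_static_py : Prop := ∀ (columns : List (List (String × String))), Dom_build_suggestions_static_py columns → Pre_build_suggestions_static_py columns → Spec_build_suggestions_static_py columns (build_suggestions_static_py columns)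

-- ===== LEMMAS AND PROOFS =====

theorem staticSuggest_nodup (dtype : String) : (staticSuggest dtype).Nodup := by
  unfold staticSuggest
  dsimp only
  split_ifs <;> decide

theorem staticSuggest_subset (dtype : String) : ∀ r ∈ staticSuggest dtype, r ∈ ruleOrder := by
  unfold staticSuggest
  dsimp only
  split_ifs <;> decide

theorem appendAt_map (keys : List String) (hk : keys.Nodup) (r : String) (hr : r ∈ keys)
    (f : String → List String) (name : String) :
    appendAt (keys.map (fun k => (k, f k))) r name
      = keys.map (fun k => (k, if k = r then f k ++ [name] else f k)) := by
  induction keys with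
  | nil => cases hr
  | cons k ks ih =>
    rcases eq_or_ne k r with h | h
    · subst h
      have hknots : k ∉ ks := (List.nodup_cons.mp hk).1
      simp only [List.map_cons, appendAt, if_true]
      congr 1
      refine List.map_congr_left fun x hx => ?_
      have : x ≠ k := fun he => hknots (he ▸ hx)
      simp [this]
    · rcases List.mem_cons.mp hr with h' | h'
      · exact absurd h'.symm h
      · simp only [List.map_cons, appendAt, if_neg h]
        rw [ih (List.nodup_cons.mp hk).2 h']

theorem foldl_appendAt (rules : List String) (hnd : rules.Nodup)
    (hsub : ∀ r ∈ rules, r ∈ ruleOrder) (f : String → List String) (name : String) :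
    rules.foldl (fun d rule => appendAt d rule name) (ruleOrder.map (fun r => (r, f r)))
      = ruleOrder.map (fun r => (r, f r ++ if r ∈ rules then [name] else [])) := by
  induction rules generalizing f with
  | nil => simp
  | cons r rs ih =>
    simp only [List.foldl_cons]
    rw [appendAt_map ruleOrder (by decide) r (hsub r (by simp)),
        ih (List.nodup_cons.mp hnd).2 (fun x hx => hsub x (List.mem_cons_of_mem _ hx))]
    refine List.map_congr_left fun k _ => ?_
    have hrnots : r ∉ rs := (List.nodup_cons.mp hnd).1
    rcases eq_or_ne k r with h | h
    · subst h
      simp [hrnots]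
    · simp [h]

-- B's per-rule gather of column names
def gather (rule : String) (columns : List (List (String × String))) : List String :=
  columns.filterMap (fun column =>
    if rule ∈ staticSuggest ((PySem.Dict.get? ⟨column⟩ "data_type").getD "")
    then some ((PySem.Dict.get? ⟨column⟩ "column_name").getD "") else none)

theorem loop_eq (columns : List (List (String × String))) (f : String → List String)
    (d2 : List (String × String)) :
    columns.foldl (fun (st : List (String × List String) × List (String × String)) column =>
        let name := (PySem.Dict.get? ⟨column⟩ "column_name").getD ""
        let dtype := (PySem.Dict.get? ⟨column⟩ "data_type").getD ""
        let dtypes := dictSet st.2 name dtype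
        let sugg := (staticSuggest dtype).foldl (fun d rule => appendAt d rule name) st.1
        (sugg, dtypes)) (ruleOrder.map (fun r => (r, f r)), d2)
      = (ruleOrder.map (fun r => (r, f r ++ gather r columns)),
         columns.foldl (fun d column =>
           dictSet d ((PySem.Dict.get? ⟨column⟩ "column_name").getD "")
                     ((PySem.Dict.get? ⟨column⟩ "data_type").getD "")) d2) := by
  induction columns generalizing f d2 with
  | nil => simp [gather]
  | cons c cs ih =>
    simp only [List.foldl_cons]
    rw [foldl_appendAt _ (staticSuggest_nodup _) (staticSuggest_subset _), ih]
    refine Prod.ext ?_ rfl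
    simp only
    refine List.map_congr_left fun k _ => ?_
    simp only [gather, List.filterMap_cons]
    split_ifs with h
    · simp [List.append_assoc]
    · simp

theorem filter_map_eq_filterMap (l : List String) (g : String → List String) :
    (l.map (fun r => (r, g r))).filter (fun p => !p.2.isEmpty)
      = l.filterMap (fun r => if (g r).isEmpty then none else some (r, g r)) := by
  induction l with
  | nil => rfl
  | cons r rs ih =>
    simp only [List.map_cons, List.filter_cons, List.filterMap_cons]
    cases h : (g r).isEmpty <;> simp [h, ih]

-- ===== VERDICT (by name: the statement is the Claim_ definition above) =====
theorem build_suggestions_static_py_spec : Claim_equal_build_suggestions_static_py := by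
  intro columns _ _
  unfold Spec_build_suggestions_static_py build_suggestions_static_py build_suggestions_static_py_alt
  simp only
  rw [show (ruleOrder.map (fun r => (r, ([] : List String)))) = ruleOrder.map (fun r => (r, (fun _ => ([] : List String)) r)) from rfl,
      loop_eq columns (fun _ => []) []]
  simp only
  rw [filter_map_eq_filterMap]
  rfl
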